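-- pv_equiv track=rewrite | github.com/ms0223900/algorithm-python-and-js | practices/chapter19_interviews/python/ch_19_interview_questions.py | count_rabbit_and_chicken
-- ===== SOURCE A (Python) =====
-- def count_rabbit_and_chicken(heads_amount=0, foot_amount=0):
--   chicken_amount = 0
--   while chicken_amount <= heads_amount:
--     rabbits_amount = heads_amount - chicken_amount
--     if rabbits_amount * 4 + chicken_amount * 2 == foot_amount:
--       return {
--         'chicken_amount': chicken_amount,
--         'rabbits_amount': rabbits_amount
--       }
--     chicken_amount += 1
--   return None
-- ===== SOURCE B (Python) =====
-- def count_rabbit_and_chicken(heads_amount=0, foot_amount=0):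
--   # Solve the two linear equations directly: chicken + rabbit = heads,
--   # 2*chicken + 4*rabbit = feet  =>  chicken = 2*heads - feet // 2.
--   if foot_amount % 2 != 0:
--     return None
--   chicken = 2 * heads_amount - foot_amount // 2
--   if 0 <= chicken <= heads_amount:
--     return {
--       'chicken_amount': chicken,
--       'rabbits_amount': heads_amount - chicken
--     }
--   return None
-- ===== Notes on version B (the rewrite author's own statement) =====
-- stated objective: faster
-- what changed: Replaced the linear scan over all candidate chicken counts with the closed-form algebraic solution of the two linear equations, validated by parity and range checks.
import Mathlib
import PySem

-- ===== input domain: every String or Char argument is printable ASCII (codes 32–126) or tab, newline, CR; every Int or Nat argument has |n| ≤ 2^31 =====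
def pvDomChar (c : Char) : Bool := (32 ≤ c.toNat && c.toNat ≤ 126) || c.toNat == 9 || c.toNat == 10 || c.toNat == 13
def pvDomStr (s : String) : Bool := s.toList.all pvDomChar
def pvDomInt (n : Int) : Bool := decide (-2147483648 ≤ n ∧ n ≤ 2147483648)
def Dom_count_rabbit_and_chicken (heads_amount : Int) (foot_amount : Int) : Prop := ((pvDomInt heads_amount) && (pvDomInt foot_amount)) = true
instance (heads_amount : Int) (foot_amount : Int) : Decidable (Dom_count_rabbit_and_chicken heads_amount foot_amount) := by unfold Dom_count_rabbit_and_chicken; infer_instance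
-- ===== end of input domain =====

-- B replaces A's O(heads) linear scan with the O(1) closed-form solution of the two linear equations.


-- ===== PORT A =====
-- while loop of A: chicken counts up from 0 while chicken ≤ heads
def pvLoopA (heads_amount foot_amount chicken : Int) : Option (List (String × Int)) :=
  if _h : chicken ≤ heads_amount then
    if (heads_amount - chicken) * 4 + chicken * 2 = foot_amount then
      some [("chicken_amount", chicken), ("rabbits_amount", heads_amount - chicken)]
    else pvLoopA heads_amount foot_amount (chicken + 1)
  else none
termination_by (heads_amount + 1 - chicken).toNat
decreasing_by omega

def count_rabbit_and_chicken (heads_amount : Int) (foot_amount : Int) : Option (List (String × Int)) :=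
  pvLoopA heads_amount foot_amount 0

-- ===== PORT B =====
def count_rabbit_and_chicken_alt (heads_amount : Int) (foot_amount : Int) : Option (List (String × Int)) :=
  if PySem.Int.mod foot_amount 2 ≠ 0 then none
  else
    let chicken := 2 * heads_amount - PySem.Int.floordiv foot_amount 2
    if 0 ≤ chicken ∧ chicken ≤ heads_amount then
      some [("chicken_amount", chicken), ("rabbits_amount", heads_amount - chicken)]
    else none

-- ===== PRECONDITION & SPEC =====
def Spec_count_rabbit_and_chicken (heads_amount : Int) (foot_amount : Int) (out : Option (List (String × Int))) : Prop := out = count_rabbit_and_chicken_alt heads_amount foot_amount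
instance (heads_amount : Int) (foot_amount : Int) (out : Option (List (String × Int))) : Decidable (Spec_count_rabbit_and_chicken heads_amount foot_amount out) := by unfold Spec_count_rabbit_and_chicken; infer_instance

-- ===== CLAIM (what is proved, stated in full; the proofs are below) =====
def Claim_equal_count_rabbit_and_chicken : Prop := ∀ (heads_amount : Int) (foot_amount : Int), Dom_count_rabbit_and_chicken heads_amount foot_amount → Spec_count_rabbit_and_chicken heads_amount foot_amount (count_rabbit_and_chicken heads_amount foot_amount)

-- ===== LEMMAS AND PROOFS =====

-- ===== VERDICT (by name: the statement is the Claim_ definition above) =====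
-- Characterisation of A's loop: starting at c it finds exactly the unique algebraic solution if it lies in [c, heads].
lemma pvLoopA_eq (h f c : Int) :
    pvLoopA h f c =
      if PySem.Int.mod f 2 = 0 ∧ c ≤ 2 * h - PySem.Int.floordiv f 2 ∧ 2 * h - PySem.Int.floordiv f 2 ≤ h then
        some [("chicken_amount", 2 * h - PySem.Int.floordiv f 2), ("rabbits_amount", h - (2 * h - PySem.Int.floordiv f 2))]
      else none := by
  have hmod : PySem.Int.mod f 2 = f % 2 := PySem.Int.mod_eq_emod_of_pos (by omega)
  have hdiv : PySem.Int.floordiv f 2 = f / 2 := PySem.Int.floordiv_eq_ediv_of_pos (by omega)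
  rw [hmod, hdiv]
  induction c using pvLoopA.induct h f with
  | case1 c hc heq =>
    rw [pvLoopA]
    simp only [hc, dite_true, heq, if_true]
    have : f % 2 = 0 ∧ c = 2 * h - f / 2 := by omega
    rw [if_pos ⟨this.1, by omega, by omega⟩]
    rw [this.2]
  | case2 c hc hne ih =>
    rw [pvLoopA]
    simp only [hc, dite_true, hne, if_false, ih]
    by_cases hcase : f % 2 = 0 ∧ c + 1 ≤ 2 * h - f / 2 ∧ 2 * h - f / 2 ≤ h
    · rw [if_pos hcase, if_pos ⟨hcase.1, by omega, hcase.2.2⟩]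
    · rw [if_neg hcase, if_neg]
      intro ⟨h1, h2, h3⟩
      apply hcase
      refine ⟨h1, ?_, h3⟩
      -- c ≠ solution since the equation failed
      have : c ≠ 2 * h - f / 2 := by
        intro he; apply hne; omega
      omega
  | case3 c hc =>
    rw [pvLoopA]
    simp only [hc, dite_false]
    rw [if_neg]; omega

theorem count_rabbit_and_chicken_spec : Claim_equal_count_rabbit_and_chicken := by
  intro h f _
  unfold Spec_count_rabbit_and_chicken count_rabbit_and_chicken count_rabbit_and_chicken_alt
  rw [pvLoopA_eq]
  by_cases hm : PySem.Int.mod f 2 = 0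
  · simp only [hm, ne_eq, not_true_eq_false, if_false]
    split_ifs with h1 h2 h2 <;> first | rfl | tauto
  · simp only [false_and, if_false, ne_eq, hm, not_false_eq_true, if_true]
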